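-- pv_equiv track=rewrite | github.com/lherron2/seed-from-alignment | src/lib/refine_unpaired_regions.py | check_complementarity_heuristic
-- ===== SOURCE A (Python) =====
-- CANONICAL_PAIRS = {
--     ("A", "U"),
--     ("U", "A"),
--     ("G", "C"),
--     ("C", "G"),
--     ("G", "U"),
--     ("U", "G"),
-- }
--
-- def is_canonical(b1: str, b2: str) -> bool:
--     """Check if two bases form a canonical Watson-Crick or Wobble pair."""
--     return (b1.upper(), b2.upper()) in CANONICAL_PAIRS
--
-- def check_complementarity_heuristic(seq1: str, seq2: str, min_len: int = 3) -> bool: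
--     """
--     Fast check if two sequences have any contiguous complementary substring
--     of at least min_len (handling standard WC+GU).
--     """
--     # Simple sliding window check
--     # Check if a k-mer in seq1 (reversed) is comp to seq2
--     # Because kissing loops are antiparallel, we check if seq1 is reverse-complementary to seq2
--     len1, len2 = len(seq1), len(seq2)
--     if len1 < min_len or len2 < min_len:
--         return False
--
--     for i in range(len1 - min_len + 1):
--         kmer = seq1[i : i + min_len]
--         # Generate target complement
--         target = []
--         for b in kmer:
--             b = b.upper()
--             if b == "A":
--                 target.append("U")
--             elif b == "U":
--                 target.append("A")  # Matches A or G
--             elif b == "G":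
--                 target.append("C")  # Matches C or U
--             elif b == "C":
--                 target.append("G")
--             else:
--                 target.append(".")  # Wildcard?
--
--         # Since it's antiparallel, an occurrence of 'target' in seq2 (read 5'-3')
--         # implies a match.
--         # But wobbles (G-U) make exact string matching hard.
--         # Let's brute force checking validity instead of string search.
--
--         for j in range(len2 - min_len + 1):
--             sub2 = seq2[j : j + min_len]
--             # Check pairing kmer (i) vs sub2 (j) antiparallel
--             # kmer[0] pairs with sub2[end], etc.
--             match = True
--             for k in range(min_len):
--                 if not is_canonical(kmer[k], sub2[min_len - 1 - k]):
--                     match = False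
--                     break
--             if match:
--                 return True
--     return False
-- ===== SOURCE B (Python) =====
-- def check_complementarity_heuristic(seq1: str, seq2: str, min_len: int = 3) -> bool:
--     # Bit-parallel anti-diagonal run scan: one bitmask per base records which
--     # positions of seq1 pair with it; a complementary antiparallel substring of
--     # length >= min_len is min_len consecutive set bits along an anti-diagonal of
--     # the pairing matrix, found with O(log min_len) big-integer shift-and steps.
--     if min_len <= 0:
--         return True
--     n1, n2 = len(seq1), len(seq2)
--     if n1 < min_len or n2 < min_len:
--         return False
--     u1 = seq1.upper()
--     r2 = seq2.upper()[::-1]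
--     # m_d: bit x set iff (u1[x], d) is a canonical (WC or wobble) pair
--     m_a = m_u = m_g = m_c = 0
--     x_bit = 1
--     for c in u1:
--         if c == "A":
--             m_u |= x_bit
--         elif c == "U":
--             m_a |= x_bit
--             m_g |= x_bit
--         elif c == "G":
--             m_u |= x_bit
--             m_c |= x_bit
--         elif c == "C":
--             m_g |= x_bit
--         x_bit <<= 1
--     wb = n1 // 8 + 1  # row width in bytes: at least one guard zero column per row
--     def row(d):
--         if d == "A":
--             return m_a
--         if d == "U":
--             return m_u
--         if d == "G":
--             return m_g
--         if d == "C":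
--             return m_c
--         return 0
--     X = int.from_bytes(b"".join(row(d).to_bytes(wb, "little") for d in r2), "little")
--     step = 8 * wb + 1  # one step along an anti-diagonal: (x+1, p+1)
--     s = 1
--     while 2 * s <= min_len:
--         X &= X >> (s * step)
--         s *= 2
--     X &= X >> ((min_len - s) * step)
--     return X != 0
-- ===== Notes on version B (the rewrite author's own statement) =====
-- stated objective: faster
-- what changed: Replaces A's triple loop (every k-mer of seq1 against every window of seq2, re-checking up to min_len pairs per position) by a bit-parallel algorithm: per-base bitmasks of the pairing matrix of seq1 against reversed seq2 are packed into one big integer with a guard column, and a run of min_len consecutive canonical pairs along an anti-diagonal is detected with O(log min_len) whole-matrix shift-and steps.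
import Mathlib
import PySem

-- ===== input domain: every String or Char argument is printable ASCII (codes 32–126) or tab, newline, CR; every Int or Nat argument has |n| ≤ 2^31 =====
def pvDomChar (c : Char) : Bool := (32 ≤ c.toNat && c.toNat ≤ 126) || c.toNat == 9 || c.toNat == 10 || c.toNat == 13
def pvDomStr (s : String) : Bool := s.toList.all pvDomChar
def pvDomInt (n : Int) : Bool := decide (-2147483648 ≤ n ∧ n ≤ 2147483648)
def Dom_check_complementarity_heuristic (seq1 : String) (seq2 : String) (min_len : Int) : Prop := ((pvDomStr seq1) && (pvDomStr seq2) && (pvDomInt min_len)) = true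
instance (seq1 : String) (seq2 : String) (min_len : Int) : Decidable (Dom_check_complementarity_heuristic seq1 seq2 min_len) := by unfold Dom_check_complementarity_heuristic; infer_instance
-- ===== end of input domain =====

-- B replaces A's triple loop (every k-mer of seq1 against every window of seq2) by a
-- bit-parallel scan: bitmask rows of the pairing matrix are packed into one integer and
-- min_len consecutive pairs along an anti-diagonal are found by repeated shift-and steps;
-- a timing run measured B faster. Same Boolean answer.

-- ===== PORT A =====
-- port of is_canonical (b.upper() is Chars.upperChar; exact on the ASCII domain)
def canonPair (b1 b2 : Char) : Bool :=
  [('A','U'), ('U','A'), ('G','C'), ('C','G'), ('G','U'), ('U','G')].contains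
    (PySem.Chars.upperChar b1, PySem.Chars.upperChar b2)

def check_complementarity_heuristic (seq1 : String) (seq2 : String) (min_len : Int) : Bool :=
  let l1 := seq1.toList
  let l2 := seq2.toList
  let len1 : Int := l1.length
  let len2 : Int := l2.length
  if len1 < min_len || len2 < min_len then false
  else
    -- for i in range(len1 - min_len + 1): ... return True on first full match
    (PySem.List.pyRange 0 (len1 - min_len + 1) 1).any fun i =>
      let kmer := PySem.List.slice l1 (some i) (some (i + min_len))
      -- target list: computed (as in A) but never read afterwards
      let _target : List Char := kmer.map (fun b =>
        let b := PySem.Chars.upperChar b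
        if b = 'A' then 'U' else if b = 'U' then 'A' else if b = 'G' then 'C'
        else if b = 'C' then 'G' else '.')
      (PySem.List.pyRange 0 (len2 - min_len + 1) 1).any fun j =>
        let sub2 := PySem.List.slice l2 (some j) (some (j + min_len))
        -- inner k-loop with break ⇒ all; indices are in range, default never read
        (PySem.List.pyRange 0 min_len 1).all fun k =>
          canonPair (PySem.List.pyGetD kmer k ' ') (PySem.List.pyGetD sub2 (min_len - 1 - k) ' ')

-- ===== PORT B =====
-- the mask-building loop of B: one bitmask per base, bit x set iff seq1[x] pairs with it
def maskStep (c : Char) (xbit : Nat) (mk : Nat × Nat × Nat × Nat) : Nat × Nat × Nat × Nat :=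
  if c = 'A' then (mk.1, mk.2.1 ||| xbit, mk.2.2.1, mk.2.2.2)
  else if c = 'U' then (mk.1 ||| xbit, mk.2.1, mk.2.2.1 ||| xbit, mk.2.2.2)
  else if c = 'G' then (mk.1, mk.2.1 ||| xbit, mk.2.2.1, mk.2.2.2 ||| xbit)
  else if c = 'C' then (mk.1, mk.2.1, mk.2.2.1 ||| xbit, mk.2.2.2)
  else mk

def maskLoop : List Char → Nat → Nat × Nat × Nat × Nat → Nat × Nat × Nat × Nat
  | [], _, mk => mk
  | c :: cs, xbit, mk => maskLoop cs (xbit <<< 1) (maskStep c xbit mk)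

-- B's row(d) helper over the four masks
def rowOf (mk : Nat × Nat × Nat × Nat) (d : Char) : Nat :=
  if d = 'A' then mk.1 else if d = 'U' then mk.2.1 else if d = 'G' then mk.2.2.1
  else if d = 'C' then mk.2.2.2 else 0

-- int.from_bytes of the little-endian join of wb-byte rows: first row in the lowest 8*wb bits
def buildX (row : Char → Nat) (W : Nat) : List Char → Nat
  | [] => 0
  | d :: ds => row d + (buildX row W ds) <<< W

-- B's while loop (fuel only makes the recursion structural; s doubles from 1, so
-- min_len.toNat steps are always enough)
def bitRunLoop (fuel : Nat) (m : Int) (s step X : Nat) : Nat × Nat :=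
  match fuel with
  | 0 => (s, X)
  | fuel + 1 =>
    if 2 * (s : Int) ≤ m then bitRunLoop fuel m (s * 2) step (X &&& (X >>> (s * step)))
    else (s, X)

def check_complementarity_heuristic_alt (seq1 : String) (seq2 : String) (min_len : Int) : Bool :=
  if min_len ≤ 0 then true
  else
    let l1 := seq1.toList
    let l2 := seq2.toList
    if (l1.length : Int) < min_len || (l2.length : Int) < min_len then false
    else
      let u1 := PySem.Chars.upper l1
      let r2 := (PySem.Chars.upper l2).reverse
      let mk := maskLoop u1 1 (0, 0, 0, 0)
      let wb : Nat := l1.length / 8 + 1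
      let X := buildX (rowOf mk) (8 * wb) r2
      let step : Nat := 8 * wb + 1
      let p := bitRunLoop min_len.toNat min_len 1 step X
      let Y := p.2 &&& (p.2 >>> ((min_len - (p.1 : Int)).toNat * step))
      Y != 0

-- ===== PRECONDITION & SPEC =====
def Spec_check_complementarity_heuristic (seq1 : String) (seq2 : String) (min_len : Int) (out : Bool) : Prop := out = check_complementarity_heuristic_alt seq1 seq2 min_len
instance (seq1 : String) (seq2 : String) (min_len : Int) (out : Bool) : Decidable (Spec_check_complementarity_heuristic seq1 seq2 min_len out) := by unfold Spec_check_complementarity_heuristic; infer_instance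

-- ===== CLAIM (what is proved, stated in full; the proofs are below) =====
def Claim_equal_check_complementarity_heuristic : Prop := ∀ (seq1 : String) (seq2 : String) (min_len : Int), Dom_check_complementarity_heuristic seq1 seq2 min_len → Spec_check_complementarity_heuristic seq1 seq2 min_len (check_complementarity_heuristic seq1 seq2 min_len)

-- ===== LEMMAS AND PROOFS =====

-- definitional unfoldings of the two ports (zeta-reduced; proved by rfl)
lemma A_unfold (seq1 seq2 : String) (m : Int) :
    check_complementarity_heuristic seq1 seq2 m =
      if ((seq1.toList.length : Int) < m || (seq2.toList.length : Int) < m) then false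
      else
        (PySem.List.pyRange 0 ((seq1.toList.length : Int) - m + 1) 1).any fun i =>
          (PySem.List.pyRange 0 ((seq2.toList.length : Int) - m + 1) 1).any fun j =>
            (PySem.List.pyRange 0 m 1).all fun k =>
              canonPair
                (PySem.List.pyGetD (PySem.List.slice seq1.toList (some i) (some (i + m))) k ' ')
                (PySem.List.pyGetD (PySem.List.slice seq2.toList (some j) (some (j + m))) (m - 1 - k) ' ') := rfl

lemma B_unfold (seq1 seq2 : String) (m : Int) :
    check_complementarity_heuristic_alt seq1 seq2 m =
      if m ≤ 0 then true
      else if ((seq1.toList.length : Int) < m || (seq2.toList.length : Int) < m) then false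
      else
        ((bitRunLoop m.toNat m 1 (8 * (seq1.toList.length / 8 + 1) + 1)
              (buildX (rowOf (maskLoop (PySem.Chars.upper seq1.toList) 1 (0, 0, 0, 0)))
                (8 * (seq1.toList.length / 8 + 1))
                ((PySem.Chars.upper seq2.toList).reverse))).2 &&&
            ((bitRunLoop m.toNat m 1 (8 * (seq1.toList.length / 8 + 1) + 1)
              (buildX (rowOf (maskLoop (PySem.Chars.upper seq1.toList) 1 (0, 0, 0, 0)))
                (8 * (seq1.toList.length / 8 + 1))
                ((PySem.Chars.upper seq2.toList).reverse))).2 >>>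
              ((m - ((bitRunLoop m.toNat m 1 (8 * (seq1.toList.length / 8 + 1) + 1)
                (buildX (rowOf (maskLoop (PySem.Chars.upper seq1.toList) 1 (0, 0, 0, 0)))
                  (8 * (seq1.toList.length / 8 + 1))
                  ((PySem.Chars.upper seq2.toList).reverse))).1 : Int)).toNat *
                (8 * (seq1.toList.length / 8 + 1) + 1)))) != 0 := rfl


-- the common specification: some antiparallel window of m consecutive canonical pairs
def PairWin (l1 l2 : List Char) (m : Nat) : Prop :=
  ∃ i j : Nat, i + m ≤ l1.length ∧ j + m ≤ l2.length ∧
    ∀ k < m, canonPair (l1.getD (i + k) ' ') (l2.getD (j + (m - 1) - k) ' ') = true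

lemma window_eq (l1 l2 : List Char) (mN iN jN kN : Nat)
    (h1 : iN + mN ≤ l1.length) (h2 : jN + mN ≤ l2.length) (hk : kN < mN) :
    canonPair
      (PySem.List.pyGetD (PySem.List.slice l1 (some (iN : Int)) (some ((iN : Int) + (mN : Int)))) (kN : Int) ' ')
      (PySem.List.pyGetD (PySem.List.slice l2 (some (jN : Int)) (some ((jN : Int) + (mN : Int)))) ((mN : Int) - 1 - (kN : Int)) ' ')
    = canonPair (l1.getD (iN + kN) ' ') (l2.getD (jN + (mN - 1) - kN) ' ') := by
  have hcast : (mN : Int) - 1 - (kN : Int) = ((mN - 1 - kN : Nat) : Int) := by omega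
  rw [PySem.List.slice_natCast_add, PySem.List.slice_natCast_add, hcast,
    PySem.List.pyGetD_natCast, PySem.List.pyGetD_natCast]
  congr 1
  · rw [List.getD_eq_getElem?_getD, List.getD_eq_getElem?_getD, List.getElem?_take,
      if_pos hk, List.getElem?_drop]
  · rw [List.getD_eq_getElem?_getD, List.getD_eq_getElem?_getD, List.getElem?_take,
      if_pos (by omega), List.getElem?_drop]
    congr 2
    omega

-- characterization of port A on the main branch
lemma A_iff (seq1 seq2 : String) (m : Int) (hm : 1 ≤ m)
    (h1 : m ≤ (seq1.toList.length : Int)) (h2 : m ≤ (seq2.toList.length : Int)) :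
    check_complementarity_heuristic seq1 seq2 m = true ↔
      PairWin seq1.toList seq2.toList m.toNat := by
  obtain ⟨mN, rfl⟩ : ∃ mN : Nat, m = (mN : Int) := ⟨m.toNat, by omega⟩
  have hguard : ¬ (((seq1.toList.length : Int) < (mN : Int) ||
      ((seq2.toList.length : Int) < (mN : Int))) = true) := by
    simp only [Bool.or_eq_true, decide_eq_true_eq]
    omega
  rw [A_unfold, if_neg hguard]
  simp only [Int.toNat_natCast]
  rw [List.any_eq_true]
  constructor
  · rintro ⟨i, hi, hinner⟩
    rw [PySem.List.mem_pyRange_one] at hi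
    rw [List.any_eq_true] at hinner
    obtain ⟨j, hj, hall⟩ := hinner
    rw [PySem.List.mem_pyRange_one] at hj
    rw [List.all_eq_true] at hall
    obtain ⟨iN, rfl⟩ : ∃ iN : Nat, i = (iN : Int) := ⟨i.toNat, by omega⟩
    obtain ⟨jN, rfl⟩ : ∃ jN : Nat, j = (jN : Int) := ⟨j.toNat, by omega⟩
    have hi' : iN + mN ≤ seq1.toList.length := by omega
    have hj' : jN + mN ≤ seq2.toList.length := by omega
    refine ⟨iN, jN, hi', hj', fun k hk => ?_⟩
    have hker := hall (k : Int) (by rw [PySem.List.mem_pyRange_one]; omega)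
    rwa [window_eq seq1.toList seq2.toList mN iN jN k hi' hj' hk] at hker
  · rintro ⟨iN, jN, hi', hj', hall⟩
    refine ⟨(iN : Int), by rw [PySem.List.mem_pyRange_one]; omega, ?_⟩
    rw [List.any_eq_true]
    refine ⟨(jN : Int), by rw [PySem.List.mem_pyRange_one]; omega, ?_⟩
    rw [List.all_eq_true]
    intro k hkmem
    rw [PySem.List.mem_pyRange_one] at hkmem
    obtain ⟨kN, rfl⟩ : ∃ kN : Nat, k = (kN : Int) := ⟨k.toNat, by omega⟩
    rw [window_eq seq1.toList seq2.toList mN iN jN kN hi' hj' (by omega)]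
    exact hall kN (by omega)

-- characterization of port B on the main branch
-- B-side: the canonical-pair table on already-uppercased bases, as B's branch logic writes it
def pairU (cu du : Char) : Bool :=
  (cu = 'A' && du = 'U') || (cu = 'U' && (du = 'A' || du = 'G')) ||
  (cu = 'G' && (du = 'C' || du = 'U')) || (cu = 'C' && du = 'G')

lemma canonPair_eq_pairU (c1 c2 : Char) :
    canonPair c1 c2 = pairU (PySem.Chars.upperChar c1) (PySem.Chars.upperChar c2) := by
  unfold canonPair pairU
  generalize PySem.Chars.upperChar c1 = a
  generalize PySem.Chars.upperChar c2 = b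
  rw [Bool.eq_iff_iff]
  simp [Prod.ext_iff]
  tauto

lemma testBit_concat (a b W q : Nat) (h : a < 2 ^ W) :
    (a + b <<< W).testBit q = if q < W then a.testBit q else b.testBit (q - W) := by
  rw [Nat.shiftLeft_eq]
  rcases Nat.lt_or_ge q W with hq | hq
  · rw [if_pos hq, Nat.testBit_eq_decide_div_mod_eq, Nat.testBit_eq_decide_div_mod_eq]
    have e : (a + b * 2 ^ W) / 2 ^ q = a / 2 ^ q + b * 2 ^ (W - q) := by
      rw [show (2:Nat) ^ W = 2 ^ (W - q) * 2 ^ q by rw [← pow_add]; congr 1; omega,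
        ← Nat.mul_assoc, Nat.add_mul_div_right _ _ (Nat.two_pow_pos q)]
    rw [e, show (2:Nat) ^ (W - q) = 2 ^ (W - q - 1) * 2 by rw [← pow_succ]; congr 1; omega,
      ← Nat.mul_assoc, Nat.add_mul_mod_self_right]
  · rw [if_neg (by omega), Nat.testBit_eq_decide_div_mod_eq, Nat.testBit_eq_decide_div_mod_eq]
    have e : (a + b * 2 ^ W) / 2 ^ q = b / 2 ^ (q - W) := by
      rw [show (2:Nat) ^ q = 2 ^ W * 2 ^ (q - W) by rw [← pow_add]; congr 1; omega,
        ← Nat.div_div_eq_div_mul, Nat.mul_comm b, Nat.add_mul_div_left _ _ (Nat.two_pow_pos W),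
        Nat.div_eq_of_lt h, Nat.zero_add]
    rw [e]

lemma maskStep_testBit (c : Char) (x0 : Nat) (mk : Nat × Nat × Nat × Nat) (d : Char) (x : Nat) :
    (rowOf (maskStep c (2 ^ x0) mk) d).testBit x =
      ((rowOf mk d).testBit x || (decide (x = x0) && pairU c d)) := by
  unfold maskStep rowOf pairU
  split_ifs <;>
    simp_all [Nat.testBit_two_pow, eq_comm, Bool.or_comm]

lemma maskLoop_testBit (cs : List Char) : ∀ (x0 : Nat) (mk : Nat × Nat × Nat × Nat)
    (d : Char) (x : Nat),
    (rowOf (maskLoop cs (2 ^ x0) mk) d).testBit x =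
      ((rowOf mk d).testBit x ||
        (decide (x0 ≤ x) && decide (x < x0 + cs.length) && pairU (cs.getD (x - x0) ' ') d)) := by
  induction cs with
  | nil =>
    intro x0 mk d x
    rw [show maskLoop [] (2 ^ x0) mk = mk from rfl, Bool.eq_iff_iff]
    simp only [Bool.or_eq_true, Bool.and_eq_true, decide_eq_true_eq, List.length_nil,
      Nat.add_zero]
    constructor
    · exact fun h => Or.inl h
    · rintro (h | ⟨⟨h1, h2⟩, h3⟩)
      · exact h
      · omega
  | cons c cs ih =>
    intro x0 mk d x
    have e : (2 : Nat) ^ x0 <<< 1 = 2 ^ (x0 + 1) := by rw [Nat.shiftLeft_eq]; ring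
    rw [maskLoop, e, ih, maskStep_testBit]
    rcases Nat.lt_trichotomy x x0 with hlt | heq | hgt
    · generalize pairU c d = P1
      generalize pairU (cs.getD (x - (x0 + 1)) ' ') d = P2
      generalize pairU ((c :: cs).getD (x - x0) ' ') d = P3
      rw [Bool.eq_iff_iff]
      simp only [Bool.or_eq_true, Bool.and_eq_true, decide_eq_true_eq, List.length_cons]
      constructor
      · rintro ((h | ⟨h1, h2⟩) | ⟨⟨h1, h2⟩, h3⟩)
        · exact Or.inl h
        · omega
        · omega
      · rintro (h | ⟨⟨h1, h2⟩, h3⟩)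
        · exact Or.inl (Or.inl h)
        · omega
    · subst heq
      rw [show (c :: cs).getD (x - x) ' ' = c from by simp]
      generalize pairU c d = P1
      generalize pairU (cs.getD (x - (x + 1)) ' ') d = P2
      rw [Bool.eq_iff_iff]
      simp only [Bool.or_eq_true, Bool.and_eq_true, decide_eq_true_eq, List.length_cons]
      constructor
      · rintro ((h | ⟨h1, h2⟩) | ⟨⟨h1, h2⟩, h3⟩)
        · exact Or.inl h
        · exact Or.inr ⟨⟨le_refl x, by omega⟩, h2⟩
        · omega
      · rintro (h | ⟨⟨h1, h2⟩, h3⟩)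
        · exact Or.inl (Or.inl h)
        · exact Or.inl (Or.inr ⟨by trivial, h3⟩)
    · rw [show x - x0 = (x - (x0 + 1)) + 1 from by omega, List.getD_cons_succ, Bool.eq_iff_iff]
      simp only [Bool.or_eq_true, Bool.and_eq_true, decide_eq_true_eq, List.length_cons]
      constructor
      · rintro ((h | ⟨h1, h2⟩) | ⟨⟨h1, h2⟩, h3⟩)
        · exact Or.inl h
        · omega
        · exact Or.inr ⟨⟨by omega, by omega⟩, h3⟩
      · rintro (h | ⟨⟨h1, h2⟩, h3⟩)
        · exact Or.inl (Or.inl h)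
        · exact Or.inr ⟨⟨by omega, by omega⟩, h3⟩

lemma mask_testBit (u1 : List Char) (d : Char) (x : Nat) :
    (rowOf (maskLoop u1 1 (0, 0, 0, 0)) d).testBit x =
      (decide (x < u1.length) && pairU (u1.getD x ' ') d) := by
  have h0 : rowOf (0, 0, 0, 0) d = 0 := by unfold rowOf; split_ifs <;> rfl
  rw [show (1 : Nat) = 2 ^ 0 from rfl, maskLoop_testBit, h0, Nat.zero_testBit,
    Bool.false_or, Nat.sub_zero]
  simp

lemma row_lt (u1 : List Char) (d : Char) (W : Nat) (h : u1.length ≤ W) :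
    rowOf (maskLoop u1 1 (0, 0, 0, 0)) d < 2 ^ W := by
  apply Nat.lt_pow_two_of_testBit
  intro i hi
  rw [mask_testBit]
  simp only [Bool.and_eq_false_iff, decide_eq_false_iff_not]
  left
  omega

lemma buildX_testBit (row : Char → Nat) (W : Nat) (hW : 0 < W) (hrow : ∀ d, row d < 2 ^ W)
    (ds : List Char) : ∀ q : Nat,
    (buildX row W ds).testBit q =
      (decide (q / W < ds.length) && (row (ds.getD (q / W) ' ')).testBit (q % W)) := by
  induction ds with
  | nil => intro q; simp [buildX]
  | cons d ds ih =>
    intro q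
    rw [buildX, testBit_concat _ _ _ _ (hrow d)]
    split_ifs with hq
    · rw [Nat.div_eq_of_lt hq, Nat.mod_eq_of_lt hq]
      simp
    · rw [ih]
      have e1 : (q - W) / W + 1 = q / W := by
        conv_rhs => rw [show q = (q - W) + W from by omega]
        rw [Nat.add_div_right _ hW]
      have e2 : (q - W) % W = q % W := by
        conv_rhs => rw [show q = (q - W) + W from by omega]
        rw [Nat.add_mod_right]
      rw [e2, ← e1]
      simp [List.getD_cons_succ, Nat.add_lt_add_iff_right]

lemma bitRunLoop_spec (X0 step : Nat) :
    ∀ (fuel : Nat) (m : Int) (s X : Nat),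
      1 ≤ s → (s : Int) ≤ m → m ≤ (s : Int) * 2 ^ fuel →
      (∀ q : Nat, X.testBit q = true ↔ ∀ t < s, X0.testBit (q + t * step) = true) →
      ((bitRunLoop fuel m s step X).1 : Int) ≤ m ∧
        m < 2 * ((bitRunLoop fuel m s step X).1 : Int) ∧
        (∀ q : Nat, (bitRunLoop fuel m s step X).2.testBit q = true ↔
          ∀ t < (bitRunLoop fuel m s step X).1, X0.testBit (q + t * step) = true) := by
  intro fuel
  induction fuel with
  | zero =>
    intro m s X hs hsm hfuel hX
    simp only [bitRunLoop]
    refine ⟨hsm, by push_cast at hfuel ⊢; omega, hX⟩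
  | succ fuel ih =>
    intro m s X hs hsm hfuel hX
    rw [bitRunLoop]
    split_ifs with h2
    · apply ih
      · omega
      · omega
      · calc m ≤ (s : Int) * 2 ^ (fuel + 1) := hfuel
          _ = ((s * 2 : Nat) : Int) * 2 ^ fuel := by push_cast [pow_succ]; ring
      · intro q
        rw [Nat.testBit_land, Nat.testBit_shiftRight, Bool.and_eq_true, hX, hX]
        constructor
        · rintro ⟨ha, hb⟩ t ht
          rcases Nat.lt_or_ge t s with h | h
          · exact ha t h
          · have := hb (t - s) (by omega)
            rwa [show s * step + q + (t - s) * step = q + t * step from by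
              rw [show t * step = (s + (t - s)) * step from by congr 1; omega,
                Nat.add_mul]; ring] at this
        · intro hall
          refine ⟨fun t ht => hall t (by omega), fun t ht => ?_⟩
          have := hall (s + t) (by omega)
          rwa [show q + (s + t) * step = s * step + q + t * step from by
            rw [Nat.add_mul]; ring] at this
    · exact ⟨hsm, by omega, hX⟩

lemma final_bits (X0 step mN s' X' : Nat) (hs1 : 1 ≤ s') (hle : s' ≤ mN) (hlt : mN < 2 * s')
    (hX' : ∀ q : Nat, X'.testBit q = true ↔ ∀ t < s', X0.testBit (q + t * step) = true)
    (q : Nat) :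
    (X' &&& (X' >>> ((mN - s') * step))).testBit q = true ↔
      ∀ t < mN, X0.testBit (q + t * step) = true := by
  rw [Nat.testBit_land, Nat.testBit_shiftRight, Bool.and_eq_true, hX', hX']
  constructor
  · rintro ⟨ha, hb⟩ t ht
    rcases Nat.lt_or_ge t s' with h | h
    · exact ha t h
    · have := hb (t - (mN - s')) (by omega)
      rwa [show (mN - s') * step + q + (t - (mN - s')) * step = q + t * step from by
        rw [show t * step = ((mN - s') + (t - (mN - s'))) * step from by congr 1; omega,
          Nat.add_mul]; ring] at this
  · intro hall
    refine ⟨fun t ht => hall t (by omega), fun t ht => ?_⟩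
    have := hall ((mN - s') + t) (by omega)
    rwa [show q + ((mN - s') + t) * step = (mN - s') * step + q + t * step from by
      rw [Nat.add_mul]; ring] at this

lemma upper_eq_map (l : List Char) : PySem.Chars.upper l = l.map PySem.Chars.upperChar := rfl

lemma getD_map_upper (l : List Char) (x : Nat) (hx : x < l.length) :
    (l.map PySem.Chars.upperChar).getD x ' ' = PySem.Chars.upperChar (l.getD x ' ') := by
  rw [List.getD_eq_getElem?_getD, List.getElem?_map, List.getElem?_eq_getElem hx,
    List.getD_eq_getElem?_getD, List.getElem?_eq_getElem hx]
  rfl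

lemma getD_rev (l : List Char) (p : Nat) (hp : p < l.length) :
    l.reverse.getD p ' ' = l.getD (l.length - 1 - p) ' ' := by
  rw [List.getD_eq_getElem _ ' ' (by simpa using hp), List.getElem_reverse,
    List.getD_eq_getElem _ ' ' (by omega)]

lemma X0_testBit (l1 l2 : List Char) (W : Nat) (hW : l1.length < W) (q : Nat) :
    (buildX (rowOf (maskLoop (PySem.Chars.upper l1) 1 (0, 0, 0, 0))) W
        ((PySem.Chars.upper l2).reverse)).testBit q = true ↔
      (q / W < l2.length ∧ q % W < l1.length ∧
        canonPair (l1.getD (q % W) ' ') (l2.getD (l2.length - 1 - q / W) ' ') = true) := by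
  have hW0 : 0 < W := by omega
  have hlenU1 : (PySem.Chars.upper l1).length = l1.length := by
    rw [upper_eq_map, List.length_map]
  have hlenR : ((PySem.Chars.upper l2).reverse).length = l2.length := by
    rw [List.length_reverse, upper_eq_map, List.length_map]
  have hrow : ∀ d, rowOf (maskLoop (PySem.Chars.upper l1) 1 (0, 0, 0, 0)) d < 2 ^ W :=
    fun d => row_lt _ _ _ (by omega)
  rw [buildX_testBit _ _ hW0 hrow, Bool.and_eq_true, decide_eq_true_eq, mask_testBit,
    Bool.and_eq_true, decide_eq_true_eq, hlenU1, hlenR]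
  obtain ⟨p, hpq⟩ : ∃ p, q / W = p := ⟨_, rfl⟩
  obtain ⟨x, hxq⟩ : ∃ x, q % W = x := ⟨_, rfl⟩
  rw [hpq, hxq]
  constructor
  · rintro ⟨hp, hx, hpair⟩
    refine ⟨hp, hx, ?_⟩
    rw [canonPair_eq_pairU]
    rw [upper_eq_map, upper_eq_map, getD_map_upper l1 _ hx,
      getD_rev _ _ (by rw [List.length_map]; exact hp), List.length_map,
      getD_map_upper l2 _ (by omega)] at hpair
    exact hpair
  · rintro ⟨hp, hx, hcan⟩
    refine ⟨hp, hx, ?_⟩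
    rw [upper_eq_map, upper_eq_map, getD_map_upper l1 _ hx,
      getD_rev _ _ (by rw [List.length_map]; exact hp), List.length_map,
      getD_map_upper l2 _ (by omega), ← canonPair_eq_pairU]
    exact hcan

lemma exists_chain_iff (l1 l2 : List Char) (mN W : Nat)
    (hmN : 1 ≤ mN) (hn1 : mN ≤ l1.length) (hn2 : mN ≤ l2.length) (hW : l1.length < W)
    (X0 : Nat)
    (hX0 : ∀ q : Nat, X0.testBit q = true ↔ (q / W < l2.length ∧ q % W < l1.length ∧
      canonPair (l1.getD (q % W) ' ') (l2.getD (l2.length - 1 - q / W) ' ') = true)) :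
    (∃ q : Nat, ∀ t < mN, X0.testBit (q + t * (W + 1)) = true) ↔ PairWin l1 l2 mN := by
  have hW0 : 0 < W := by omega
  constructor
  · rintro ⟨q, hchain⟩
    obtain ⟨x, hxq⟩ : ∃ x, q % W = x := ⟨_, rfl⟩
    obtain ⟨p, hpq⟩ : ∃ p, q / W = p := ⟨_, rfl⟩
    have hdecomp : ∀ t < mN, (q + t * (W + 1)) % W = x + t ∧
        (q + t * (W + 1)) / W = p + t := by
      intro t
      induction t with
      | zero => intro _; simpa using ⟨hxq, hpq⟩
      | succ t iht =>
        intro ht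
        obtain ⟨e1, e2⟩ := iht (by omega)
        have hbit := (hX0 _).mp (hchain t (by omega))
        obtain ⟨hp, hx, -⟩ := hbit
        rw [e1] at hx
        have estep : q + (t + 1) * (W + 1) =
            W * ((q + t * (W + 1)) / W) + W + (x + t + 1) := by
          conv_lhs => rw [show (t + 1) * (W + 1) = t * (W + 1) + (W + 1) from by ring,
            ← Nat.add_assoc, ← Nat.div_add_mod (q + t * (W + 1)) W, e1]
          ring
        have hr : x + t + 1 < W := by omega
        constructor
        · rw [estep, show W * ((q + t * (W + 1)) / W) + W + (x + t + 1) =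
            W * ((q + t * (W + 1)) / W + 1) + (x + t + 1) from by ring,
            Nat.mul_add_mod, Nat.mod_eq_of_lt hr]
          omega
        · rw [estep, show W * ((q + t * (W + 1)) / W) + W + (x + t + 1) =
            W * ((q + t * (W + 1)) / W + 1) + (x + t + 1) from by ring,
            Nat.mul_add_div hW0, Nat.div_eq_of_lt hr, Nat.add_zero, e2]
          omega
    have h0 := (hX0 _).mp (hchain 0 (by omega))
    simp only [Nat.zero_mul, Nat.add_zero] at h0
    rw [hxq, hpq] at h0
    obtain ⟨hp0, hx0, -⟩ := h0
    have hlastd := hdecomp (mN - 1) (by omega)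
    have hlast := (hX0 _).mp (hchain (mN - 1) (by omega))
    rw [hlastd.1, hlastd.2] at hlast
    obtain ⟨hpL, hxL, -⟩ := hlast
    refine ⟨x, l2.length - mN - p, by omega, by omega, ?_⟩
    intro k hk
    have hb := (hX0 _).mp (hchain k hk)
    rw [(hdecomp k hk).1, (hdecomp k hk).2] at hb
    obtain ⟨hpk, hxk, hcan⟩ := hb
    rw [show l2.length - mN - p + (mN - 1) - k = l2.length - 1 - (p + k) from by omega]
    exact hcan
  · rintro ⟨iN, jN, hi', hj', hall⟩
    refine ⟨(l2.length - mN - jN) * W + iN, fun t ht => ?_⟩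
    rw [hX0]
    have estep : (l2.length - mN - jN) * W + iN + t * (W + 1) =
        W * (l2.length - mN - jN + t) + (iN + t) := by ring
    have hr : iN + t < W := by omega
    rw [estep, Nat.mul_add_div hW0, Nat.mul_add_mod, Nat.mod_eq_of_lt hr,
      Nat.div_eq_of_lt hr, Nat.add_zero]
    refine ⟨by omega, by omega, ?_⟩
    rw [show l2.length - 1 - (l2.length - mN - jN + t) = jN + (mN - 1) - t from by omega]
    exact hall t ht

lemma B_iff (seq1 seq2 : String) (m : Int) (hm : 1 ≤ m)
    (h1 : m ≤ (seq1.toList.length : Int)) (h2 : m ≤ (seq2.toList.length : Int)) :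
    check_complementarity_heuristic_alt seq1 seq2 m = true ↔
      PairWin seq1.toList seq2.toList m.toNat := by
  obtain ⟨mN, rfl⟩ : ∃ mN : Nat, m = (mN : Int) := ⟨m.toNat, by omega⟩
  rw [B_unfold, if_neg (by omega),
    if_neg (by simp only [Bool.or_eq_true, decide_eq_true_eq]; omega)]
  simp only [Int.toNat_natCast]
  set W : Nat := 8 * (seq1.toList.length / 8 + 1) with hWd
  have hW : seq1.toList.length < W := by omega
  have hW0 : 0 < W := by omega
  set X0 : Nat := buildX (rowOf (maskLoop (PySem.Chars.upper seq1.toList) 1 (0, 0, 0, 0))) W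
    ((PySem.Chars.upper seq2.toList).reverse) with hX0d
  set bl := bitRunLoop mN (mN : Int) 1 (W + 1) X0 with hbl
  have hpow : (mN : Int) ≤ (1 : Nat) * 2 ^ mN := by
    have h2p : (mN : Int) < 2 ^ mN := by exact_mod_cast Nat.lt_two_pow_self
    push_cast
    omega
  have hinit : ∀ q : Nat, X0.testBit q = true ↔ ∀ t < 1, X0.testBit (q + t * (W + 1)) = true := by
    intro q
    constructor
    · intro h t ht
      have : t = 0 := by omega
      subst this
      simpa using h
    · intro h
      simpa using h 0 (by omega)
  obtain ⟨hle', hlt', hbits'⟩ :=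
    bitRunLoop_spec X0 (W + 1) mN (mN : Int) 1 X0 (le_refl 1) (by exact_mod_cast hm) hpow hinit
  rw [← hbl] at hle' hlt' hbits'
  have hs1 : 1 ≤ bl.1 := by omega
  have hcast : ((mN : Int) - (bl.1 : Int)).toNat = mN - bl.1 := by omega
  rw [hcast]
  have hfin := fun q => final_bits X0 (W + 1) mN bl.1 bl.2 hs1 (by exact_mod_cast hle')
    (by exact_mod_cast hlt') hbits' q
  have hchain := exists_chain_iff seq1.toList seq2.toList mN W (by omega) (by omega) (by omega)
    hW X0 (fun q => X0_testBit seq1.toList seq2.toList W hW q)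
  rw [show ((bl.2 &&& (bl.2 >>> ((mN - bl.1) * (W + 1)))) != 0) = true ↔
      (bl.2 &&& (bl.2 >>> ((mN - bl.1) * (W + 1)))) ≠ 0 from by simp]
  constructor
  · intro hne
    obtain ⟨q, hq⟩ := Nat.exists_testBit_of_ne_zero hne
    exact hchain.mp ⟨q, (hfin q).mp hq⟩
  · intro hPW
    obtain ⟨q, hq⟩ := hchain.mpr hPW
    intro h0
    have hz := (hfin q).mpr hq
    rw [h0] at hz
    simp [Nat.zero_testBit] at hz

-- ===== VERDICT (by name: the statement is the Claim_ definition above) =====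
theorem check_complementarity_heuristic_spec : Claim_equal_check_complementarity_heuristic := by
  intro seq1 seq2 m _dom
  unfold Spec_check_complementarity_heuristic
  by_cases hm0 : m ≤ 0
  · -- both sides are true
    have hB : check_complementarity_heuristic_alt seq1 seq2 m = true := by
      rw [B_unfold]; simp [hm0]
    have hA : check_complementarity_heuristic seq1 seq2 m = true := by
      rw [A_unfold]
      have hg : ¬ ((seq1.toList.length : Int) < m || (seq2.toList.length : Int) < m) = true := by
        simp; omega
      rw [if_neg hg]
      rw [List.any_eq_true]
      refine ⟨0, by rw [PySem.List.mem_pyRange_one]; constructor <;> omega, ?_⟩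
      rw [List.any_eq_true]
      refine ⟨0, by rw [PySem.List.mem_pyRange_one]; constructor <;> omega, ?_⟩
      rw [PySem.List.pyRange_one_eq_nil hm0]
      simp
    rw [hA, hB]
  · rw [not_le] at hm0
    by_cases hsmall : ((seq1.toList.length : Int) < m ∨ (seq2.toList.length : Int) < m)
    · -- both sides are false
      have hA : check_complementarity_heuristic seq1 seq2 m = false := by
        rw [A_unfold]
        split_ifs with h
        · rfl
        · exfalso; simp at h hsmall; omega
      have hB : check_complementarity_heuristic_alt seq1 seq2 m = false := by
        rw [B_unfold]
        split_ifs with h0 h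
        · exfalso; omega
        · rfl
        · exfalso; simp at h hsmall; omega
      rw [hA, hB]
    · rw [not_or] at hsmall
      have hA := A_iff seq1 seq2 m (by omega) (by omega) (by omega)
      have hB := B_iff seq1 seq2 m (by omega) (by omega) (by omega)
      cases hAv : check_complementarity_heuristic seq1 seq2 m <;>
        cases hBv : check_complementarity_heuristic_alt seq1 seq2 m <;>
          simp_all
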